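-- pv_equiv track=rewrite | github.com/L-1ngg/VibeCode | MCP/websearch/websearch/utils/env_parser.py | _parse_env_value
-- ===== SOURCE A (Python) =====
-- def _find_unescaped_quote(text: str, quote: str) -> int:
--     escaped = False
--     for idx, ch in enumerate(text):
--         if escaped:
--             escaped = False
--             continue
--         if ch == "\\":
--             escaped = True
--             continue
--         if ch == quote:
--             return idx
--     return -1
--
-- def _unescape_quoted_value(value: str, quote: str) -> str:
--     if quote not in ("'", '"'):
--         return value
--     result: list[str] = []
--     i = 0
--     n = len(value)
--     while i < n:
--         ch = value[i]
--         if ch == "\\" and i + 1 < n: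
--             nxt = value[i + 1]
--             if quote == '"':
--                 mapping = {"n": "\n", "r": "\r", "t": "\t", "\\": "\\", '"': '"'}
--                 if nxt in mapping:
--                     result.append(mapping[nxt])
--                     i += 2
--                     continue
--             elif nxt in {"\\", "'"}:
--                 result.append(nxt)
--                 i += 2
--                 continue
--         result.append(ch)
--         i += 1
--     return "".join(result)
--
-- def _strip_inline_comment_unquoted(value: str) -> str:
--     escaped = False
--     for idx, ch in enumerate(value):
--         if escaped:
--             escaped = False
--             continue
--         if ch == "\\":
--             escaped = True
--             continue
--         if ch == "#" and (idx == 0 or value[idx - 1].isspace()):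
--             return value[:idx].rstrip()
--     return value.rstrip()
--
-- def _parse_env_value(value_part: str, lines: list[str], start_idx: int) -> tuple[str, int]:
--     value_part = value_part.lstrip()
--     if not value_part:
--         return "", start_idx
--
--     quote = value_part[0]
--     if quote not in ("'", '"'):
--         return _strip_inline_comment_unquoted(value_part).strip(), start_idx
--
--     idx = start_idx
--     buffer = value_part[1:]
--     while True:
--         end = _find_unescaped_quote(buffer, quote)
--         if end >= 0:
--             inner = buffer[:end]
--             return _unescape_quoted_value(inner, quote), idx
--         idx += 1
--         if idx >= len(lines):
--             return _unescape_quoted_value(buffer, quote), idx - 1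
--         buffer += "\n" + lines[idx]
-- ===== SOURCE B (Python) =====
-- # B: incremental alternative. A rescans the whole accumulated buffer from the start
-- # for every continuation line; B scans each continuation line as it arrives (the joining
-- # "\n" consumes any pending backslash escape, so each chunk scan starts unescaped)
-- # and joins the chunks once at the end.
--
-- def _scan_chunk(text: str, quote: str):
--     """Index of the first unescaped `quote` in `text`, or None (scan starts unescaped)."""
--     escaped = False
--     for pos, ch in enumerate(text):
--         if escaped:
--             escaped = False
--         elif ch == "\\":
--             escaped = True
--         elif ch == quote:
--             return pos
--     return None
--
-- def _unquote(value: str, quote: str) -> str: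
--     if quote == '"':
--         specials = {"n": "\n", "r": "\r", "t": "\t", "\\": "\\", '"': '"'}
--     else:
--         specials = {"\\": "\\", "'": "'"}
--     out: list[str] = []
--     pending = False
--     for ch in value:
--         if pending:
--             pending = False
--             if ch in specials:
--                 out.append(specials[ch])
--             else:
--                 out.append("\\")
--                 out.append(ch)
--         elif ch == "\\":
--             pending = True
--         else:
--             out.append(ch)
--     if pending:
--         out.append("\\")
--     return "".join(out)
--
-- def _parse_env_value(value_part: str, lines: list[str], start_idx: int) -> tuple[str, int]:
--     value_part = value_part.lstrip()
--     if not value_part: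
--         return "", start_idx
--
--     quote = value_part[0]
--     if quote not in ("'", '"'):
--         # unquoted: one forward scan for a comment marker, tracking the previous char
--         escaped = False
--         prev = ""
--         cut = len(value_part)
--         for i, ch in enumerate(value_part):
--             if escaped:
--                 escaped = False
--             elif ch == "\\":
--                 escaped = True
--             elif ch == "#" and (i == 0 or prev.isspace()):
--                 cut = i
--                 break
--             prev = ch
--         return value_part[:cut].rstrip(), start_idx
--
--     chunks = [value_part[1:]]
--     idx = start_idx
--     while True:
--         pos = _scan_chunk(chunks[-1], quote)
--         if pos is not None:
--             chunks[-1] = chunks[-1][:pos]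
--             return _unquote("\n".join(chunks), quote), idx
--         idx += 1
--         if idx >= len(lines):
--             return _unquote("\n".join(chunks), quote), idx - 1
--         chunks.append(lines[idx])
-- ===== Notes on version B (the rewrite author's own statement) =====
-- stated objective: alternative
-- what changed: A rescans the entire accumulated buffer (and re-concatenates it) for every continuation line of a multi-line quoted value; B instead scans each continuation line once as it arrives, carrying the scan across chunk boundaries (the joining newline absorbs any pending backslash escape), joins the chunks once at the end, and replaces the two-position-lookahead unescape and the index-based comment scan by single passes carrying a pending-escape flag / the previous character.
import Mathlib
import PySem

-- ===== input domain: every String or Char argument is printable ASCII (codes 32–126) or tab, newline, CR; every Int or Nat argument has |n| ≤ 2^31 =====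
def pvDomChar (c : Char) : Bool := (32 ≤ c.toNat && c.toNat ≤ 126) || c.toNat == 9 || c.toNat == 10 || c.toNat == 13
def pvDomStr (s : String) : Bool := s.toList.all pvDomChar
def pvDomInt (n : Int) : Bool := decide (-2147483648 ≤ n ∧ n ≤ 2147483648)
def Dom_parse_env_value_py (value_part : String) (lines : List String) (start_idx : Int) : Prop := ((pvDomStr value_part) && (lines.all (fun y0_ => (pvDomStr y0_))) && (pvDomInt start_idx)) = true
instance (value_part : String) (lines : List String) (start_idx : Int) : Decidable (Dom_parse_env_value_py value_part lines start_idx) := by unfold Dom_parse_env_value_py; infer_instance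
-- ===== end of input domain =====

-- B re-implements A's quoted-value scan incrementally: A rescans the accumulated buffer
-- for every continuation line, B scans each continuation line as it arrives and joins once.

-- ===== PORT A =====

-- _find_unescaped_quote: loop with an `escaped` flag and a running index
def pvAFindUnescaped (quote : Char) : List Char → Bool → Int → Int
  | [], _, _ => -1
  | c :: rest, escaped, i =>
    if escaped then pvAFindUnescaped quote rest false (i + 1)
    else if c = '\\' then pvAFindUnescaped quote rest true (i + 1)
    else if c = quote then i
    else pvAFindUnescaped quote rest false (i + 1)

-- the `mapping` dict literal for quote == '"'
def pvADoubleMap : PySem.Dict Char Char :=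
  PySem.Dict.mk [('n', '\n'), ('r', '\r'), ('t', '\t'), ('\\', '\\'), ('"', '"')]

-- _unescape_quoted_value's while loop (advances by 1 or 2 positions)
def pvAUnescape (quote : Char) : List Char → List Char
  | [] => []
  | [c] => [c]                                  -- ch == '\\' but i+1 >= n, or a plain char
  | c :: nxt :: rest' =>
    if c = '\\' then
      if quote = '"' then
        match PySem.Dict.get? pvADoubleMap nxt with
        | some m => m :: pvAUnescape quote rest'
        | none => c :: pvAUnescape quote (nxt :: rest')
      else if nxt = '\\' ∨ nxt = '\'' then nxt :: pvAUnescape quote rest'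
      else c :: pvAUnescape quote (nxt :: rest')
    else c :: pvAUnescape quote (nxt :: rest')

-- _unescape_quoted_value: the quote-kind guard, then the loop
def pvAUnescapeTop (value : List Char) (quote : Char) : List Char :=
  if ¬(quote = '\'' ∨ quote = '"') then value else pvAUnescape quote value

-- _strip_inline_comment_unquoted: `full` is the whole string (for value[idx-1]), scan with index
def pvAStripGo (full : List Char) : List Char → Bool → Nat → List Char
  | [], _, _ => PySem.Chars.rstrip full
  | c :: rest, escaped, i =>
    if escaped then pvAStripGo full rest false (i + 1)
    else if c = '\\' then pvAStripGo full rest true (i + 1)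
    -- value[idx-1]: when i > 0 the index i-1 is in range, so getD's default is never read
    else if c = '#' ∧ (i = 0 ∨ PySem.Chars.isspace (full.getD (i - 1) ' ')) then
      PySem.Chars.rstrip (full.take i)
    else pvAStripGo full rest false (i + 1)

def pvAStripComment (value : List Char) : List Char := pvAStripGo value value false 0

-- the `while True` accumulation loop; returns the raw inner text and the final index
-- (each Python `return` applies _unescape_quoted_value once to the value returned;
-- the caller below applies it at this single exit).  On the iteration where Python's
-- lines[idx] raises IndexError (excluded by Pre_) the pyGet? none-branch returns a dummy.
def pvALoop (quote : Char) (lines : List String) (buffer : List Char) (idx : Int) :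
    List Char × Int :=
  let e := pvAFindUnescaped quote buffer false 0
  if 0 ≤ e then (buffer.take e.toNat, idx)
  else if _h : (lines.length : Int) ≤ idx + 1 then (buffer, idx)   -- returns idx' - 1 = idx
  else
    match PySem.List.pyGet? lines (idx + 1) with
    | none => (buffer, idx + 1)
    | some line => pvALoop quote lines (buffer ++ '\n' :: line.toList) (idx + 1)
termination_by ((lines.length : Int) - idx).toNat
decreasing_by omega

def parse_env_value_py (value_part : String) (lines : List String) (start_idx : Int) :
    String × Int :=
  match PySem.Chars.lstrip value_part.toList with
  | [] => ("", start_idx)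
  | quote :: rest =>
    if ¬(quote = '\'' ∨ quote = '"') then
      (String.ofList (PySem.Chars.strip (pvAStripComment (quote :: rest))), start_idx)
    else
      let r := pvALoop quote lines rest start_idx
      (String.ofList (pvAUnescapeTop r.1 quote), r.2)

-- ===== PORT B =====

-- shift a found position by one consumed character
def pvBBump : Option Nat → Option Nat
  | none => none
  | some p => some (p + 1)

-- _scan_chunk: first unescaped quote in one chunk, scan starts unescaped
def pvBScan (quote : Char) : List Char → Bool → Option Nat
  | [], _ => none
  | c :: rest, escaped =>
    if escaped then pvBBump (pvBScan quote rest false)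
    else if c = '\\' then pvBBump (pvBScan quote rest true)
    else if c = quote then some 0
    else pvBBump (pvBScan quote rest false)

-- the `specials` dict chosen once from the quote kind
def pvBSpecials (quote : Char) : PySem.Dict Char Char :=
  if quote = '"' then PySem.Dict.mk [('n', '\n'), ('r', '\r'), ('t', '\t'), ('\\', '\\'), ('"', '"')]
  else PySem.Dict.mk [('\\', '\\'), ('\'', '\'')]

-- _unquote: one pass with a `pending` backslash flag
def pvBUnquote (specials : PySem.Dict Char Char) : List Char → Bool → List Char
  | [], pending => if pending then ['\\'] else []
  | c :: rest, pending =>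
    if pending then
      (match PySem.Dict.get? specials c with
       | some m => [m]
       | none => ['\\', c]) ++ pvBUnquote specials rest false
    else if c = '\\' then pvBUnquote specials rest true
    else c :: pvBUnquote specials rest false

-- the unquoted-value scan: cut position of an inline comment, carrying the previous char
-- (prev = none models Python's initial prev = "")
def pvBCut : List Char → Bool → Option Char → Nat → Option Nat
  | [], _, _, _ => none
  | c :: rest, escaped, prev, i =>
    if escaped then pvBCut rest false (some c) (i + 1)
    else if c = '\\' then pvBCut rest true (some c) (i + 1)
    else if c = '#' ∧ (i = 0 ∨ prev.elim false PySem.Chars.isspace = true) then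
      some i
    else pvBCut rest false (some c) (i + 1)

-- "\n".join(chunks): chunks are accumulated in reverse (Lean's natural list `append`)
def pvBJoin (rchunks : List (List Char)) (cur : List Char) : List Char :=
  PySem.Chars.join ['\n'] ((cur :: rchunks).reverse)

-- the chunk loop: scan only the newest chunk
def pvBLoop (quote : Char) (lines : List String) (rchunks : List (List Char))
    (cur : List Char) (idx : Int) : List Char × Int :=
  match pvBScan quote cur false with
  | some p => (pvBJoin rchunks (cur.take p), idx)
  | none =>
    if _h : (lines.length : Int) ≤ idx + 1 then (pvBJoin rchunks cur, idx)
    else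
      match PySem.List.pyGet? lines (idx + 1) with
      | none => (pvBJoin rchunks cur, idx + 1)
      | some line => pvBLoop quote lines (cur :: rchunks) line.toList (idx + 1)
termination_by ((lines.length : Int) - idx).toNat
decreasing_by omega

def parse_env_value_py_alt (value_part : String) (lines : List String) (start_idx : Int) :
    String × Int :=
  match PySem.Chars.lstrip value_part.toList with
  | [] => ("", start_idx)
  | quote :: rest =>
    if ¬(quote = '\'' ∨ quote = '"') then
      let cut := (pvBCut (quote :: rest) false none 0).getD (quote :: rest).length
      (String.ofList (PySem.Chars.rstrip ((quote :: rest).take cut)), start_idx)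
    else
      let r := pvBLoop quote lines [] rest start_idx
      (String.ofList (pvBUnquote (pvBSpecials quote) r.1 false), r.2)

-- ===== PRECONDITION & SPEC =====

-- closed form of "cs contains an unescaped q": some position i holds q and the maximal run
-- of consecutive backslashes immediately before i (from j to i) has even length
def pvHasUnescaped (q : Char) (cs : List Char) : Prop :=
  ∃ i < cs.length, cs.getD i ' ' = q ∧
    ∃ j ≤ i, (i - j) % 2 = 0 ∧ (∀ k < i, j ≤ k → cs.getD k ' ' = '\\') ∧
      (j = 0 ∨ cs.getD (j - 1) ' ' ≠ '\\')

-- Pre_ excludes exactly the inputs where Python A raises IndexError: a quoted value whose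
-- opening line has no closing (unescaped) quote together with start_idx + 1 < -len(lines),
-- so that the very first lines[idx] access is a negative index below range.  (B raises there too.)
def Pre_parse_env_value_py (value_part : String) (lines : List String) (start_idx : Int) : Prop :=
  (-(lines.length : Int) ≤ start_idx + 1 ∨
    (match PySem.Chars.lstrip value_part.toList with
     | [] => True
     | q :: rest => (q = '\'' ∨ q = '"') → pvHasUnescaped q rest))
instance (value_part : String) (lines : List String) (start_idx : Int) :
    Decidable (Pre_parse_env_value_py value_part lines start_idx) := by
  unfold Pre_parse_env_value_py
  rcases PySem.Chars.lstrip value_part.toList with _ | ⟨q, rest⟩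
  · infer_instance
  · unfold pvHasUnescaped; infer_instance

def pvWitness_parse_env_value_py : String × List String × Int := ("\"a\\nb", ["x\" #c", "y"], 0)

def Spec_parse_env_value_py (value_part : String) (lines : List String) (start_idx : Int) (out : String × Int) : Prop := out = parse_env_value_py_alt value_part lines start_idx
instance (value_part : String) (lines : List String) (start_idx : Int) (out : String × Int) : Decidable (Spec_parse_env_value_py value_part lines start_idx out) := by unfold Spec_parse_env_value_py; infer_instance

-- ===== CLAIM (what is proved, stated in full; the proofs are below) =====
def Claim_equal_parse_env_value_py : Prop := ∀ (value_part : String) (lines : List String) (start_idx : Int), Dom_parse_env_value_py value_part lines start_idx → Pre_parse_env_value_py value_part lines start_idx → Spec_parse_env_value_py value_part lines start_idx (parse_env_value_py value_part lines start_idx)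

-- ===== LEMMAS AND PROOFS =====

theorem pvA_unescape_cons_ne (quote c : Char) (xs : List Char) (hc : c ≠ '\\') :
    pvAUnescape quote (c :: xs) = c :: pvAUnescape quote xs := by
  cases xs <;> simp [pvAUnescape, hc]

theorem pv_unescape_eq (quote : Char) (hq : quote = '\'' ∨ quote = '"') :
    ∀ cs, pvAUnescape quote cs = pvBUnquote (pvBSpecials quote) cs false := by
  have key : ∀ (n : Nat) (cs : List Char), cs.length ≤ n →
      pvAUnescape quote cs = pvBUnquote (pvBSpecials quote) cs false := by
    intro n
    induction n with
    | zero =>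
      intro cs hn
      have : cs = [] := by cases cs <;> simp_all
      subst this
      simp [pvAUnescape, pvBUnquote]
    | succ n ihn =>
      intro cs hn
      match cs with
      | [] => simp [pvAUnescape, pvBUnquote]
      | [c] =>
        by_cases hc : c = '\\' <;> simp [pvAUnescape, pvBUnquote, hc]
      | c :: nxt :: rest' =>
        have hlen : rest'.length ≤ n := by have := hn; simp at this; omega
        have hlen2 : (nxt :: rest').length ≤ n := by
          have := hn; simp at this; simp; omega
        by_cases hc : c = '\\'
        · subst hc
          rcases hq with hq | hq <;> subst hq
          · -- quote = '\''
            have hA : pvAUnescape '\'' ('\\' :: nxt :: rest')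
                = if nxt = '\\' ∨ nxt = '\'' then nxt :: pvAUnescape '\'' rest'
                  else '\\' :: pvAUnescape '\'' (nxt :: rest') := by
              simp [pvAUnescape]
            have hB : pvBUnquote (pvBSpecials '\'') ('\\' :: nxt :: rest') false
                = (match PySem.Dict.get? (pvBSpecials '\'') nxt with
                   | some m => [m]
                   | none => ['\\', nxt]) ++ pvBUnquote (pvBSpecials '\'') rest' false := by
              simp [pvBUnquote]
            rw [hA, hB]
            by_cases hn2 : nxt = '\\' ∨ nxt = '\''
            · have hget : PySem.Dict.get? (pvBSpecials '\'') nxt = some nxt := by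
                rcases hn2 with h2 | h2 <;> subst h2 <;> decide
              rw [if_pos hn2, hget, ihn rest' hlen]
              rfl
            · have h1 : nxt ≠ '\\' := fun h => hn2 (Or.inl h)
              have h2 : nxt ≠ '\'' := fun h => hn2 (Or.inr h)
              have hget : PySem.Dict.get? (pvBSpecials '\'') nxt = none := by
                simp [pysem, pvBSpecials, PySem.Dict.get?, Ne.symm h1, Ne.symm h2]
              rw [if_neg hn2, hget, pvA_unescape_cons_ne _ _ _ h1, ihn rest' hlen]
              rfl
          · -- quote = '"'
            have hA : pvAUnescape '"' ('\\' :: nxt :: rest')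
                = (match PySem.Dict.get? pvADoubleMap nxt with
                   | some m => m :: pvAUnescape '"' rest'
                   | none => '\\' :: pvAUnescape '"' (nxt :: rest')) := by
              simp [pvAUnescape]
            have hB : pvBUnquote (pvBSpecials '"') ('\\' :: nxt :: rest') false
                = (match PySem.Dict.get? (pvBSpecials '"') nxt with
                   | some m => [m]
                   | none => ['\\', nxt]) ++ pvBUnquote (pvBSpecials '"') rest' false := by
              simp [pvBUnquote]
            have hSp : pvBSpecials '"' = pvADoubleMap := by decide
            rw [hA, hB, hSp]
            cases hget : PySem.Dict.get? pvADoubleMap nxt with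
            | some m =>
              rw [ihn rest' hlen]
              rfl
            | none =>
              have hnxt : nxt ≠ '\\' := by rintro rfl; revert hget; decide
              rw [pvA_unescape_cons_ne _ _ _ hnxt, ihn rest' hlen]
              rfl
        · rw [pvA_unescape_cons_ne _ _ _ hc]
          have hB : pvBUnquote (pvBSpecials quote) (c :: nxt :: rest') false
              = c :: pvBUnquote (pvBSpecials quote) (nxt :: rest') false := by
            simp [pvBUnquote, hc]
          rw [hB, ihn (nxt :: rest') hlen2]
  intro cs
  exact key cs.length cs le_rfl

-- escape state after scanning a chunk (proof-side only)
def pvEscAfter : List Char → Bool → Bool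
  | [], e => e
  | c :: rest, e => pvEscAfter rest (if e then false else c = '\\')

theorem pv_find_append (quote : Char) :
    ∀ (xs : List Char) (e : Bool) (i : Int) (ys : List Char),
      pvAFindUnescaped quote (xs ++ ys) e i =
        (match pvBScan quote xs e with
         | some p => i + (p : Int)
         | none => pvAFindUnescaped quote ys (pvEscAfter xs e) (i + xs.length)) := by
  intro xs
  induction xs with
  | nil => intro e i ys; simp [pvBScan, pvEscAfter]
  | cons c r ih =>
    intro e i ys
    rw [List.cons_append]
    by_cases he : e = true
    · subst he
      rw [show pvAFindUnescaped quote (c :: (r ++ ys)) true i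
            = pvAFindUnescaped quote (r ++ ys) false (i + 1) from by simp [pvAFindUnescaped],
          show pvBScan quote (c :: r) true = pvBBump (pvBScan quote r false) from by
            simp [pvBScan],
          ih]
      cases h : pvBScan quote r false with
      | some p => simp [pvBBump]; ring
      | none =>
        simp only [pvBBump, List.length_cons]
        rw [show pvEscAfter (c :: r) true = pvEscAfter r false from by simp [pvEscAfter]]
        congr 1; push_cast; omega
    · replace he : e = false := by simpa using he
      subst he
      by_cases hc : c = '\\'
      · subst hc
        rw [show pvAFindUnescaped quote ('\\' :: (r ++ ys)) false i
              = pvAFindUnescaped quote (r ++ ys) true (i + 1) from by simp [pvAFindUnescaped],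
            show pvBScan quote ('\\' :: r) false = pvBBump (pvBScan quote r true) from by
              simp [pvBScan],
            ih]
        cases h : pvBScan quote r true with
        | some p => simp [pvBBump]; ring
        | none =>
          simp only [pvBBump, List.length_cons]
          rw [show pvEscAfter ('\\' :: r) false = pvEscAfter r true from by simp [pvEscAfter]]
          congr 1; push_cast; omega
      · by_cases hcq : c = quote
        · subst hcq
          simp [pvAFindUnescaped, pvBScan, hc]
        · rw [show pvAFindUnescaped quote (c :: (r ++ ys)) false i
                = pvAFindUnescaped quote (r ++ ys) false (i + 1) from by
                  simp [pvAFindUnescaped, hc, hcq],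
              show pvBScan quote (c :: r) false = pvBBump (pvBScan quote r false) from by
                simp [pvBScan, hc, hcq],
              ih]
          cases h : pvBScan quote r false with
          | some p => simp [pvBBump]; ring
          | none =>
            simp only [pvBBump, List.length_cons]
            rw [show pvEscAfter (c :: r) false = pvEscAfter r false from by simp [pvEscAfter, hc]]
            congr 1; push_cast; omega

theorem pv_find_newline (quote : Char) (hq : quote ≠ '\n') (e : Bool) (i : Int) (ys : List Char) :
    pvAFindUnescaped quote ('\n' :: ys) e i = pvAFindUnescaped quote ys false (i + 1) := by
  cases e <;>
    simp [pvAFindUnescaped, Ne.symm hq, (by decide : ('\n' : Char) ≠ '\\')]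

-- front-first view of pvBJoin
def pvJF : List (List Char) → List Char → List Char
  | [], cur => cur
  | f :: fs, cur => f ++ '\n' :: pvJF fs cur

def pvOffset : List (List Char) → Nat
  | [] => 0
  | f :: fs => f.length + 1 + pvOffset fs

theorem pv_join_cons (f : List Char) (L : List (List Char)) (h : L ≠ []) :
    PySem.Chars.join ['\n'] (f :: L) = f ++ '\n' :: PySem.Chars.join ['\n'] L := by
  cases L with
  | nil => simp at h
  | cons x xs => simp [PySem.Chars.join, List.intercalate, List.intersperse]

theorem pv_join_gen : ∀ (L : List (List Char)) (cur : List Char),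
    PySem.Chars.join ['\n'] (L ++ [cur]) = pvJF L cur := by
  intro L
  induction L with
  | nil => intro cur; simp [PySem.Chars.join, List.intercalate, pvJF]
  | cons f fs ih =>
    intro cur
    rw [List.cons_append, pv_join_cons f (fs ++ [cur]) (by simp), ih, pvJF]

theorem pv_join_eq (rchunks : List (List Char)) (cur : List Char) :
    pvBJoin rchunks cur = pvJF rchunks.reverse cur := by
  rw [pvBJoin, List.reverse_cons, pv_join_gen]

theorem pv_jF_append (L : List (List Char)) (a b : List Char) :
    pvJF L a ++ b = pvJF L (a ++ b) := by
  induction L with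
  | nil => simp [pvJF]
  | cons f fs ih => simp [pvJF, ih]

theorem pv_jF_snoc (L : List (List Char)) (x cur : List Char) :
    pvJF (L ++ [x]) cur = pvJF L (x ++ '\n' :: cur) := by
  induction L with
  | nil => simp [pvJF]
  | cons f fs ih => simp [pvJF, ih]

theorem pv_find_jF (quote : Char) (hq : quote ≠ '\n') :
    ∀ (front : List (List Char)) (cur : List Char),
      (∀ c ∈ front, pvBScan quote c false = none) → ∀ i : Int,
      pvAFindUnescaped quote (pvJF front cur) false i =
        (match pvBScan quote cur false with
         | some p => i + (pvOffset front : Int) + (p : Int)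
         | none => -1) := by
  intro front
  induction front with
  | nil =>
    intro cur _ i
    have h0 := pv_find_append quote cur false i []
    rw [List.append_nil] at h0
    simp only [pvJF]
    rw [h0]
    cases h : pvBScan quote cur false with
    | some p => simp [pvOffset]
    | none => simp [pvAFindUnescaped]
  | cons f fs ih =>
    intro cur hnone i
    have hf : pvBScan quote f false = none := hnone f (by simp)
    rw [show pvJF (f :: fs) cur = f ++ '\n' :: pvJF fs cur from rfl,
        pv_find_append quote f false i ('\n' :: pvJF fs cur), hf]
    rw [pv_find_newline quote hq, ih cur (fun c hc => hnone c (by simp [hc])) (i + f.length + 1)]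
    cases h : pvBScan quote cur false with
    | some p => simp only [pvOffset]; push_cast; ring
    | none => rfl

theorem pv_take_jF (front : List (List Char)) (cur : List Char) (p : Nat) :
    (pvJF front cur).take (pvOffset front + p) = pvJF front (cur.take p) := by
  induction front with
  | nil => simp [pvJF, pvOffset]
  | cons f fs ih =>
    simp only [pvJF, pvOffset]
    rw [List.take_append, List.take_of_length_le (by omega),
      (by omega : f.length + 1 + pvOffset fs + p - f.length = (pvOffset fs + p) + 1),
      List.take_succ_cons, ih]

theorem pv_loop_eq (quote : Char) (hq : quote ≠ '\n') (lines : List String) :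
    ∀ (idx : Int) (rchunks : List (List Char)) (cur : List Char),
      (∀ c ∈ rchunks, pvBScan quote c false = none) →
      pvALoop quote lines (pvJF rchunks.reverse cur) idx = pvBLoop quote lines rchunks cur idx := by
  have key : ∀ (n : Nat) (idx : Int) (rchunks : List (List Char)) (cur : List Char),
      ((lines.length : Int) - idx).toNat ≤ n →
      (∀ c ∈ rchunks, pvBScan quote c false = none) →
      pvALoop quote lines (pvJF rchunks.reverse cur) idx = pvBLoop quote lines rchunks cur idx := by
    intro n
    induction n with
    | zero =>
      intro idx rchunks cur hn hnone
      rw [pvALoop, pvBLoop]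
      have hrev : ∀ c ∈ rchunks.reverse, pvBScan quote c false = none := by
        intro c hc; exact hnone c (List.mem_reverse.mp hc)
      rw [pv_find_jF quote hq rchunks.reverse cur hrev 0]
      cases h : pvBScan quote cur false with
      | some p =>
        have hpos : (0:Int) ≤ 0 + (pvOffset rchunks.reverse : Int) + (p : Int) := by positivity
        rw [if_pos hpos]
        have : ((0:Int) + (pvOffset rchunks.reverse : Int) + (p : Int)).toNat
            = pvOffset rchunks.reverse + p := by omega
        rw [this, pv_take_jF]
        simp [pv_join_eq]
      | none =>
        rw [if_neg (by norm_num)]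
        have hstop : (lines.length : Int) ≤ idx + 1 := by omega
        simp [pv_join_eq, hstop]
    | succ n ihn =>
      intro idx rchunks cur hn hnone
      rw [pvALoop, pvBLoop]
      have hrev : ∀ c ∈ rchunks.reverse, pvBScan quote c false = none := by
        intro c hc; exact hnone c (List.mem_reverse.mp hc)
      rw [pv_find_jF quote hq rchunks.reverse cur hrev 0]
      cases h : pvBScan quote cur false with
      | some p =>
        have hpos : (0:Int) ≤ 0 + (pvOffset rchunks.reverse : Int) + (p : Int) := by positivity
        rw [if_pos hpos]
        have : ((0:Int) + (pvOffset rchunks.reverse : Int) + (p : Int)).toNat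
            = pvOffset rchunks.reverse + p := by omega
        rw [this, pv_take_jF]
        simp [pv_join_eq]
      | none =>
        rw [if_neg (by norm_num)]
        by_cases hstop : (lines.length : Int) ≤ idx + 1
        · simp [pv_join_eq, hstop]
        · rw [dif_neg hstop]
          show (match PySem.List.pyGet? lines (idx + 1) with
                | none => (pvJF rchunks.reverse cur, idx + 1)
                | some line =>
                  pvALoop quote lines (pvJF rchunks.reverse cur ++ '\n' :: line.toList) (idx + 1))
              = (if _h : (lines.length : Int) ≤ idx + 1 then (pvBJoin rchunks cur, idx)
                 else
                   match PySem.List.pyGet? lines (idx + 1) with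
                   | none => (pvBJoin rchunks cur, idx + 1)
                   | some line => pvBLoop quote lines (cur :: rchunks) line.toList (idx + 1))
          rw [dif_neg hstop]
          cases hline : PySem.List.pyGet? lines (idx + 1) with
          | none => simp [pv_join_eq]
          | some line =>
            show pvALoop quote lines (pvJF rchunks.reverse cur ++ '\n' :: line.toList) (idx + 1)
                = pvBLoop quote lines (cur :: rchunks) line.toList (idx + 1)
            rw [show pvJF rchunks.reverse cur ++ '\n' :: line.toList
                  = pvJF (cur :: rchunks).reverse line.toList from by
                rw [List.reverse_cons, pv_jF_snoc, ← pv_jF_append]]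
            exact ihn (idx + 1) (cur :: rchunks) line.toList (by omega)
              (by intro c hc
                  rcases List.mem_cons.mp hc with hc | hc
                  · subst hc; exact h
                  · exact hnone c hc)
  intro idx rchunks cur hnone
  exact key ((lines.length : Int) - idx).toNat idx rchunks cur le_rfl hnone

theorem pv_getD_last (pre x : List Char) (d : Char) (h : pre ≠ []) :
    (pre ++ x).getD (pre.length - 1) d = pre.getLast h := by
  have hlt : pre.length - 1 < pre.length := by
    have := List.length_pos_of_ne_nil h; omega
  rw [List.getD_eq_getElem?_getD, List.getElem?_append_left hlt,
    List.getElem?_eq_getElem hlt]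
  simp [List.getLast_eq_getElem]

theorem pv_strip_eq (suffix : List Char) :
    ∀ (pre : List Char) (esc : Bool),
      pvAStripGo (pre ++ suffix) suffix esc pre.length =
        PySem.Chars.rstrip ((pre ++ suffix).take
          ((pvBCut suffix esc pre.getLast? pre.length).getD (pre ++ suffix).length)) := by
  induction suffix with
  | nil =>
    intro pre esc
    simp [pvAStripGo, pvBCut, List.take_length]
  | cons c rest ih =>
    intro pre esc
    have hfull : (pre ++ [c]) ++ rest = pre ++ c :: rest := by simp
    have H : ∀ e2 : Bool, pvAStripGo (pre ++ c :: rest) rest e2 (pre.length + 1) =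
        PySem.Chars.rstrip ((pre ++ c :: rest).take
          ((pvBCut rest e2 (some c) (pre.length + 1)).getD (pre ++ c :: rest).length)) := by
      intro e2
      have H0 := ih (pre ++ [c]) e2
      simp only [hfull, List.length_append, List.length_cons, List.length_nil,
        List.getLast?_concat, Nat.zero_add] at H0
      rw [show pre.length + (rest.length + 1) = (pre ++ c :: rest).length from by simp] at H0
      exact H0
    by_cases hesc : esc = true
    · subst hesc
      rw [show pvAStripGo (pre ++ c :: rest) (c :: rest) true pre.length
            = pvAStripGo (pre ++ c :: rest) rest false (pre.length + 1) from by
          simp [pvAStripGo],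
        show pvBCut (c :: rest) true pre.getLast? pre.length
            = pvBCut rest false (some c) (pre.length + 1) from by simp [pvBCut]]
      exact H false
    · replace hesc : esc = false := by simpa using hesc
      subst hesc
      by_cases hc : c = '\\'
      · subst hc
        rw [show pvAStripGo (pre ++ '\\' :: rest) ('\\' :: rest) false pre.length
              = pvAStripGo (pre ++ '\\' :: rest) rest true (pre.length + 1) from by
            simp [pvAStripGo],
          show pvBCut ('\\' :: rest) false pre.getLast? pre.length
              = pvBCut rest true (some '\\') (pre.length + 1) from by simp [pvBCut]]
        exact H true
      · have hdisj : (pre.length = 0 ∨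
              PySem.Chars.isspace ((pre ++ c :: rest).getD (pre.length - 1) ' ') = true) ↔
            (pre.length = 0 ∨ pre.getLast?.elim false PySem.Chars.isspace = true) := by
          cases pre with
          | nil => simp
          | cons p ps =>
            rw [pv_getD_last (p :: ps) (c :: rest) ' ' (by simp),
              List.getLast?_eq_some_getLast (show (p :: ps) ≠ [] by simp)]
            simp
        by_cases hsharp : c = '#' ∧ (pre.length = 0 ∨ pre.getLast?.elim false PySem.Chars.isspace = true)
        · have hsharpA : c = '#' ∧ (pre.length = 0 ∨
              PySem.Chars.isspace ((pre ++ c :: rest).getD (pre.length - 1) ' ') = true) :=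
            ⟨hsharp.1, hdisj.mpr hsharp.2⟩
          rw [show pvAStripGo (pre ++ c :: rest) (c :: rest) false pre.length
                = PySem.Chars.rstrip ((pre ++ c :: rest).take pre.length) from by
              rw [pvAStripGo]
              rw [if_neg (by simp), if_neg (by simp [hc]), if_pos hsharpA],
            show pvBCut (c :: rest) false pre.getLast? pre.length = some pre.length from by
              rw [pvBCut]
              rw [if_neg (by simp), if_neg (by simp [hc]), if_pos hsharp]]
          rfl
        · have hsharpA : ¬(c = '#' ∧ (pre.length = 0 ∨
              PySem.Chars.isspace ((pre ++ c :: rest).getD (pre.length - 1) ' ') = true)) := by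
            intro hA; exact hsharp ⟨hA.1, hdisj.mp hA.2⟩
          rw [show pvAStripGo (pre ++ c :: rest) (c :: rest) false pre.length
                = pvAStripGo (pre ++ c :: rest) rest false (pre.length + 1) from by
              rw [pvAStripGo]
              rw [if_neg (by simp), if_neg (by simp [hc]), if_neg hsharpA],
            show pvBCut (c :: rest) false pre.getLast? pre.length
                = pvBCut rest false (some c) (pre.length + 1) from by
              rw [pvBCut]
              rw [if_neg (by simp), if_neg (by simp [hc]), if_neg hsharp]]
          exact H false

theorem pv_dropWhile_idem (p : Char → Bool) (l : List Char) :
    (l.dropWhile p).dropWhile p = l.dropWhile p := by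
  induction l with
  | nil => rfl
  | cons a l ih => by_cases h : p a <;> simp [h, ih]

theorem pv_rstrip_prefix (y : List Char) : PySem.Chars.rstrip y <+: y := by
  have h := (List.dropWhile_suffix (l := y.reverse) PySem.Chars.isspace).reverse
  rw [List.reverse_reverse] at h
  exact h

theorem pv_rstrip_idem (y : List Char) :
    PySem.Chars.rstrip (PySem.Chars.rstrip y) = PySem.Chars.rstrip y := by
  simp [PySem.Chars.rstrip, List.reverse_reverse, pv_dropWhile_idem]

theorem pv_strip_rstrip (v : List Char) (hv : PySem.Chars.lstrip v = v) (t : Nat) :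
    PySem.Chars.strip (PySem.Chars.rstrip (v.take t)) = PySem.Chars.rstrip (v.take t) := by
  have hpre2 : PySem.Chars.rstrip (v.take t) <+: v :=
    (pv_rstrip_prefix (v.take t)).trans (List.take_prefix t v)
  rw [PySem.Chars.strip]
  have hX : PySem.Chars.lstrip (PySem.Chars.rstrip (v.take t))
      = PySem.Chars.rstrip (v.take t) := by
    cases hXc : PySem.Chars.rstrip (v.take t) with
    | nil => simp [PySem.Chars.lstrip]
    | cons a l =>
      rw [hXc] at hpre2
      rcases hpre2 with ⟨s, hs⟩
      have hna : PySem.Chars.isspace a = false := by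
        rw [PySem.Chars.lstrip] at hv
        by_contra hcon
        simp only [Bool.not_eq_false] at hcon
        rw [← hs, List.cons_append, List.dropWhile_cons, if_pos hcon] at hv
        have hlen := congrArg List.length hv
        have hle := List.length_dropWhile_le PySem.Chars.isspace (l ++ s)
        rw [List.length_cons] at hlen
        omega
      simp [PySem.Chars.lstrip, hna]
  rw [hX, pv_rstrip_idem]

-- ===== VERDICT (by name: the statement is the Claim_ definition above) =====
theorem parse_env_value_py_spec : Claim_equal_parse_env_value_py := by
  intro vp lines si _ _
  show parse_env_value_py vp lines si = parse_env_value_py_alt vp lines si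
  cases hls : PySem.Chars.lstrip vp.toList with
  | nil => simp [parse_env_value_py, parse_env_value_py_alt, hls]
  | cons q rest =>
    simp only [parse_env_value_py, parse_env_value_py_alt, hls]
    by_cases hq : q = '\'' ∨ q = '"'
    · rw [if_neg (not_not_intro hq), if_neg (not_not_intro hq)]
      have hqn : q ≠ '\n' := by rcases hq with h | h <;> subst h <;> decide
      have hloop : pvALoop q lines rest si = pvBLoop q lines [] rest si := by
        have h0 := pv_loop_eq q hqn lines si [] rest (by simp)
        simpa [pvJF] using h0
      simp only [hloop]
      rw [pvAUnescapeTop, if_neg (not_not_intro hq), pv_unescape_eq q hq]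
    · rw [if_pos hq, if_pos hq]
      have hS := pv_strip_eq (q :: rest) [] false
      simp only [List.nil_append, List.length_nil, List.getLast?_nil] at hS
      rw [pvAStripComment, hS]
      have hlst : PySem.Chars.lstrip (q :: rest) = q :: rest := by
        rw [← hls]
        simp [PySem.Chars.lstrip, pv_dropWhile_idem]
      rw [pv_strip_rstrip (q :: rest) hlst]
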